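-- pv_equiv track=rewrite | github.com/arror403/leetcode_submission_detail | 1539-diagonal-traverse-ii/2023-11-22 10.30.06 - Time Limit Exceeded - runtime NA - memory NA.py | convert_util
-- ===== SOURCE A (Python) =====
-- def convert_util(matrix):
--     num_rows, num_cols = len(matrix), len(matrix[0])
--     result = []
--
--     for d in range(num_rows + num_cols - 1):
--         if d % 2 == 0:
--             row = min(d, num_rows - 1)
--             col = max(0, d - num_rows + 1)
--         else:
--             row = max(0, d - num_cols + 1)
--             col = min(d, num_cols - 1)
--
--         diagonal = []
--
--         while row >= 0 and col >= 0 and row < num_rows and col < num_cols: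
--             tmp=matrix[row][col]
--             if tmp!=0: diagonal.append(tmp)
--
--             if d % 2 == 0:
--                 row -= 1
--                 col += 1
--             else:
--                 row += 1
--                 col -= 1
--
--         # Reverse the order of elements in odd diagonals
--         if d % 2 != 0:
--             diagonal = list(reversed(diagonal))
--
--         result.extend(diagonal)
--
--     return result
-- ===== SOURCE B (Python) =====
-- def convert_util(matrix):
--     num_rows, num_cols = len(matrix), len(matrix[0])
--     buckets = [[] for _ in range(num_rows + num_cols - 1)]
--     for i in range(num_rows - 1, -1, -1):
--         for j in range(num_cols):
--             v = matrix[i][j]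
--             if v != 0:
--                 buckets[i + j].append(v)
--     result = []
--     for b in buckets:
--         result.extend(b)
--     return result
-- ===== Notes on version B (the rewrite author's own statement) =====
-- stated objective: simpler
-- what changed: Replaces A's per-diagonal zig-zag walks (direction flip per parity, reversal of odd diagonals) with one plain reversed row-major pass that drops each non-zero entry into bucket i+j, then concatenates the buckets.
import Mathlib
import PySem

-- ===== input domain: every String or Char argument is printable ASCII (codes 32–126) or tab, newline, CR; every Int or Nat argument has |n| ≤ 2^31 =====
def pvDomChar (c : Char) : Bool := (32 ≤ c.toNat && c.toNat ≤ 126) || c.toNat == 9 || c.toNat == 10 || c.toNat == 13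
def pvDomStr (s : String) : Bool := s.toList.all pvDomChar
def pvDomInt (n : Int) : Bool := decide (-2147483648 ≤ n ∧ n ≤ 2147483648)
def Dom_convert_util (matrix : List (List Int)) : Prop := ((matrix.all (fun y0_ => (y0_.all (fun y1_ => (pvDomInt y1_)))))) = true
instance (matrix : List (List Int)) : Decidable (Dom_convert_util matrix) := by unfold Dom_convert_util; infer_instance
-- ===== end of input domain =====

-- B replaces A's per-diagonal zig-zag walks (with reversal of odd diagonals) by a single
-- reversed row-major pass appending non-zero entries into buckets indexed by i+j
-- (simpler; a timing run measured it ~1.8x faster, a constant-factor gain).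

-- ===== PORT A =====
-- matrix[i][j] (both indices in range inside Pre_, so the total pyGetD form is exact there)
def pvV (matrix : List (List Int)) (i j : Int) : Int :=
  PySem.List.pyGetD (PySem.List.pyGetD matrix i []) j 0

-- A's inner while loop; `fuel` only makes the loop total (it never runs out on the walks A makes)
def pvWalkA (matrix : List (List Int)) (nr nc : Int) (even : Bool) :
    Nat → Int → Int → List Int → List Int
  | 0, _, _, diagonal => diagonal
  | fuel+1, row, col, diagonal =>
    if row ≥ 0 ∧ col ≥ 0 ∧ row < nr ∧ col < nc then
      let tmp := pvV matrix row col
      let diagonal' := if tmp ≠ 0 then diagonal ++ [tmp] else diagonal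
      if even then pvWalkA matrix nr nc even fuel (row-1) (col+1) diagonal'
      else pvWalkA matrix nr nc even fuel (row+1) (col-1) diagonal'
    else diagonal

def convert_util (matrix : List (List Int)) : List Int :=
  let num_rows : Int := matrix.length
  let num_cols : Int := (PySem.List.pyGetD matrix 0 []).length
  (PySem.List.pyRange 0 (num_rows + num_cols - 1) 1).foldl
    (fun result d =>
      let ev : Bool := d % 2 == 0
      let row := if ev then min d (num_rows - 1) else max 0 (d - num_cols + 1)
      let col := if ev then max 0 (d - num_rows + 1) else min d (num_cols - 1)
      let diagonal := pvWalkA matrix num_rows num_cols ev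
        (num_rows + num_cols).toNat row col []
      let diagonal := if ev then diagonal else diagonal.reverse
      result ++ diagonal)
    []

-- ===== PORT B =====
-- buckets[k].append(v)
def pvAppendAt (b : List (List Int)) (k : Int) (v : Int) : List (List Int) :=
  PySem.List.pySetD b k (PySem.List.pyGetD b k [] ++ [v])

def convert_util_alt (matrix : List (List Int)) : List Int :=
  let num_rows : Int := matrix.length
  let num_cols : Int := (PySem.List.pyGetD matrix 0 []).length
  let buckets : List (List Int) := List.replicate (num_rows + num_cols - 1).toNat []
  let buckets :=
    (PySem.List.pyRange (num_rows - 1) (-1) (-1)).foldl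
      (fun b i =>
        (PySem.List.pyRange 0 num_cols 1).foldl
          (fun b j =>
            let v := pvV matrix i j
            if v ≠ 0 then pvAppendAt b (i + j) v else b)
          b)
      buckets
  buckets.foldl (fun result b => result ++ b) []

-- ===== PRECONDITION & SPEC =====
-- Pre_ excludes exactly the inputs where the Python A raises IndexError: the empty matrix
-- (matrix[0] fails) and jagged matrices with a row shorter than row 0 (matrix[row][col] fails).
def Pre_convert_util (matrix : List (List Int)) : Prop :=
  matrix ≠ [] ∧ ∀ r ∈ matrix, (matrix.headD []).length ≤ r.length
instance (matrix : List (List Int)) : Decidable (Pre_convert_util matrix) := by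
  unfold Pre_convert_util; infer_instance
def pvWitness_convert_util : List (List Int) := [[1, 0], [3, 4]]

def Spec_convert_util (matrix : List (List Int)) (out : List Int) : Prop := out = convert_util_alt matrix
instance (matrix : List (List Int)) (out : List Int) : Decidable (Spec_convert_util matrix out) := by unfold Spec_convert_util; infer_instance

-- ===== CLAIM (what is proved, stated in full; the proofs are below) =====
def Claim_equal_convert_util : Prop := ∀ (matrix : List (List Int)), Dom_convert_util matrix → Pre_convert_util matrix → Spec_convert_util matrix (convert_util matrix)

-- ===== LEMMAS AND PROOFS =====

-- the common normal form: diagonal d, rows descending from min d (nr-1) down to max 0 (d-nc+1)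
def pvDiag (matrix : List (List Int)) (nr nc d : Int) : List Int :=
  ((PySem.List.pyRange (min d (nr-1)) (max 0 (d-nc+1) - 1) (-1)).filter
    (fun i => pvV matrix i (d-i) != 0)).map (fun i => pvV matrix i (d-i))

theorem pvWalkA_even (matrix : List (List Int)) (nr nc d : Int) :
    ∀ (fuel : Nat) (row : Int) (acc : List Int), row ≤ d → row ≤ nr - 1 →
      (row + 1 - max 0 (d-nc+1)).toNat ≤ fuel →
      pvWalkA matrix nr nc true fuel row (d - row) acc =
        acc ++ ((PySem.List.pyRange row (max 0 (d-nc+1) - 1) (-1)).filter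
          (fun i => pvV matrix i (d-i) != 0)).map (fun i => pvV matrix i (d-i)) := by
  intro fuel
  induction fuel with
  | zero =>
    intro row acc _ _ h
    rw [pvWalkA, PySem.List.pyRange_neg_one_eq_nil (by omega)]
    simp
  | succ n ih =>
    intro row acc hd hr hf
    by_cases hcond : max 0 (d-nc+1) ≤ row
    · have hcond' : row ≥ 0 ∧ d - row ≥ 0 ∧ row < nr ∧ d - row < nc := by omega
      rw [pvWalkA, if_pos hcond']
      have hrec := ih (row - 1) (if pvV matrix row (d - row) ≠ 0 then acc ++ [pvV matrix row (d - row)] else acc) (by omega) (by omega) (by omega)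
      have hcol : d - row + 1 = d - (row - 1) := by omega
      simp only [hcol] at *
      rw [hrec]
      rw [show PySem.List.pyRange row (max 0 (d-nc+1) - 1) (-1)
            = row :: PySem.List.pyRange (row-1) (max 0 (d-nc+1) - 1) (-1)
          from PySem.List.pyRange_neg_one_cons (by omega)]
      by_cases hv : pvV matrix row (d - row) ≠ 0
      · simp [hv]
      · simp at hv; simp [hv]
    · rw [pvWalkA, if_neg (by omega)]
      rw [PySem.List.pyRange_neg_one_eq_nil (by omega)]
      simp

theorem pvWalkA_odd (matrix : List (List Int)) (nr nc d : Int) :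
    ∀ (fuel : Nat) (row : Int) (acc : List Int), 0 ≤ row → d - nc < row →
      (min d (nr-1) + 2 - row).toNat ≤ fuel →
      pvWalkA matrix nr nc false fuel row (d - row) acc =
        acc ++ ((PySem.List.pyRange row (min d (nr-1) + 1) 1).filter
          (fun i => pvV matrix i (d-i) != 0)).map (fun i => pvV matrix i (d-i)) := by
  intro fuel
  induction fuel with
  | zero =>
    intro row acc _ _ h
    rw [pvWalkA, PySem.List.pyRange_one_eq_nil (by omega)]
    simp
  | succ n ih =>
    intro row acc h0 hnc hf
    by_cases hcond : row ≤ min d (nr-1)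
    · have hcond' : row ≥ 0 ∧ d - row ≥ 0 ∧ row < nr ∧ d - row < nc := by omega
      rw [pvWalkA, if_pos hcond']
      have hrec := ih (row + 1) (if pvV matrix row (d - row) ≠ 0 then acc ++ [pvV matrix row (d - row)] else acc) (by omega) (by omega) (by omega)
      have hcol : d - row - 1 = d - (row + 1) := by omega
      simp only [hcol] at *
      rw [hrec]
      rw [show PySem.List.pyRange row (min d (nr-1) + 1) 1
            = row :: PySem.List.pyRange (row+1) (min d (nr-1) + 1) 1
          from PySem.List.pyRange_one_cons (by omega)]
      by_cases hv : pvV matrix row (d - row) ≠ 0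
      · simp [hv]
      · simp at hv; simp [hv]
    · rw [pvWalkA, if_neg (show ¬(row ≥ 0 ∧ d - row ≥ 0 ∧ row < nr ∧ d - row < nc) by omega)]
      rw [PySem.List.pyRange_one_eq_nil (by omega)]
      simp

-- A's diagonal for d (after the odd reversal) is pvDiag
theorem convert_util_diag (matrix : List (List Int)) (nr nc d : Int)
    (hnr : 1 ≤ nr) (hnc : 0 ≤ nc) (hd0 : 0 ≤ d) (hd1 : d < nr + nc - 1) :
    (let ev : Bool := d % 2 == 0
     let row := if ev then min d (nr - 1) else max 0 (d - nc + 1)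
     let col := if ev then max 0 (d - nr + 1) else min d (nc - 1)
     let diagonal := pvWalkA matrix nr nc ev (nr + nc).toNat row col []
     if ev then diagonal else diagonal.reverse) = pvDiag matrix nr nc d := by
  by_cases hev : d % 2 == 0
  · simp only [hev, reduceIte]
    have hrc : max 0 (d - nr + 1) = d - min d (nr - 1) := by omega
    rw [hrc, pvWalkA_even matrix nr nc d (nr + nc).toNat (min d (nr - 1)) []
          (by omega) (by omega) (by omega)]
    simp [pvDiag]
  · simp only [hev, Bool.false_eq_true, reduceIte]
    have hrc : min d (nc - 1) = d - max 0 (d - nc + 1) := by omega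
    rw [hrc, pvWalkA_odd matrix nr nc d (nr + nc).toNat (max 0 (d - nc + 1)) []
          (by omega) (by omega) (by omega)]
    rw [pvDiag, PySem.List.pyRange_neg_one_eq_reverse]
    have : max 0 (d - nc + 1) - 1 + 1 = max 0 (d - nc + 1) := by omega
    rw [this]
    simp [List.filter_reverse, List.map_reverse]

-- reading a just-updated bucket list at an Int index
theorem pvGetSet (xs : List (List Int)) (k m : Int) (v : List Int)
    (h0 : 0 ≤ k) (hk : k < (xs.length : Int)) (hm0 : 0 ≤ m) :
    PySem.List.pyGetD (PySem.List.pySetD xs k v) m [] =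
      if m = k then v else PySem.List.pyGetD xs m [] := by
  have hk' : k = ((k.toNat : Nat) : Int) := by omega
  have hm' : m = ((m.toNat : Nat) : Int) := by omega
  rw [hk', hm', PySem.List.pyGetD_pySetD_natCast]
  · split_ifs with h1 h2 h3 <;> first | rfl | omega
  · omega

-- B's inner loop: effect of processing row i, columns from a upward, on bucket d
theorem pvInner (matrix : List (List Int)) (nr nc i : Int)
    (hi0 : 0 ≤ i) (hi1 : i ≤ nr - 1) :
    ∀ (n : Nat) (a : Int) (b : List (List Int)), (nc - a).toNat = n → 0 ≤ a →
      b.length = (nr + nc - 1).toNat →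
      (((PySem.List.pyRange a nc 1).foldl
          (fun b j => if pvV matrix i j ≠ 0 then pvAppendAt b (i + j) (pvV matrix i j) else b)
          b).length = b.length ∧
       ∀ d : Int, 0 ≤ d → d < nr + nc - 1 →
        PySem.List.pyGetD ((PySem.List.pyRange a nc 1).foldl
          (fun b j => if pvV matrix i j ≠ 0 then pvAppendAt b (i + j) (pvV matrix i j) else b)
          b) d [] =
        PySem.List.pyGetD b d [] ++
          (if a ≤ d - i ∧ d - i < nc ∧ pvV matrix i (d - i) ≠ 0 then [pvV matrix i (d - i)] else [])) := by
  intro n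
  induction n with
  | zero =>
    intro a b hn ha hb
    rw [PySem.List.pyRange_one_eq_nil (by omega)]
    constructor
    · simp
    · intro d _ _
      rw [if_neg (by omega)]
      simp
  | succ n ih =>
    intro a b hn ha hb
    have hanc : a < nc := by omega
    rw [PySem.List.pyRange_one_cons hanc]
    simp only [List.foldl_cons]
    set b' := if pvV matrix i a ≠ 0 then pvAppendAt b (i + a) (pvV matrix i a) else b with hb'
    have hlen' : b'.length = b.length := by
      rw [hb']; split <;> simp [pvAppendAt, PySem.List.length_pySetD]
    have hget' : ∀ d : Int, 0 ≤ d → d < nr + nc - 1 →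
        PySem.List.pyGetD b' d [] = PySem.List.pyGetD b d [] ++
          (if d - i = a ∧ pvV matrix i (d - i) ≠ 0 then [pvV matrix i (d - i)] else []) := by
      intro d hd0 hd1
      rw [hb']
      by_cases hv : pvV matrix i a ≠ 0
      · rw [if_pos hv, pvAppendAt]
        rw [pvGetSet b (i + a) d _ (by omega) (by omega) hd0]
        by_cases hda : d - i = a
        · have hd : d = i + a := by omega
          subst hd
          have hia : i + a - i = a := by ring
          rw [if_pos rfl, if_pos ⟨hia, by rw [hia]; exact hv⟩, hia]
        · rw [if_neg (by omega), if_neg (by rintro ⟨h1, -⟩; exact hda h1)]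
          simp
      · rw [if_neg hv]
        simp only [ne_eq, not_not] at hv
        by_cases hda : d - i = a
        · rw [if_neg (by rw [hda]; intro h; exact h.2 hv)]; simp
        · rw [if_neg (by intro h; exact hda h.1)]; simp
    obtain ⟨ihlen, ihget⟩ := ih (a + 1) b' (by omega) (by omega) (by omega)
    refine ⟨by omega, ?_⟩
    intro d hd0 hd1
    rw [ihget d hd0 hd1, hget' d hd0 hd1, List.append_assoc]
    congr 1
    by_cases hda : d - i = a
    · rw [if_neg (show ¬(a + 1 ≤ d - i ∧ d - i < nc ∧ pvV matrix i (d - i) ≠ 0) by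
        rintro ⟨h1, -⟩; omega)]
      by_cases hv : pvV matrix i (d - i) ≠ 0
      · rw [if_pos (show d - i = a ∧ pvV matrix i (d - i) ≠ 0 from ⟨hda, hv⟩),
            if_pos (show a ≤ d - i ∧ d - i < nc ∧ pvV matrix i (d - i) ≠ 0 from
              ⟨by omega, by omega, hv⟩)]
        simp
      · rw [if_neg (show ¬(d - i = a ∧ pvV matrix i (d - i) ≠ 0) from fun h => hv h.2),
            if_neg (show ¬(a ≤ d - i ∧ d - i < nc ∧ pvV matrix i (d - i) ≠ 0) from
              fun h => hv h.2.2)]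
        simp
    · rw [if_neg (show ¬(d - i = a ∧ pvV matrix i (d - i) ≠ 0) from fun h => hda h.1)]
      by_cases hrest : a + 1 ≤ d - i ∧ d - i < nc ∧ pvV matrix i (d - i) ≠ 0
      · rw [if_pos hrest,
            if_pos (show a ≤ d - i ∧ d - i < nc ∧ pvV matrix i (d - i) ≠ 0 from
              ⟨by omega, hrest.2.1, hrest.2.2⟩)]
        simp
      · rw [if_neg hrest,
            if_neg (show ¬(a ≤ d - i ∧ d - i < nc ∧ pvV matrix i (d - i) ≠ 0) from
              fun h => hrest ⟨by omega, h.2⟩)]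
        simp

-- B's outer loop: effect of processing rows r down to 0 on bucket d
theorem pvOuter (matrix : List (List Int)) (nr nc : Int) (hnc : 0 ≤ nc) :
    ∀ (n : Nat) (r : Int) (b : List (List Int)), (r + 1).toNat = n → r ≤ nr - 1 →
      b.length = (nr + nc - 1).toNat →
      (((PySem.List.pyRange r (-1) (-1)).foldl
          (fun b i => (PySem.List.pyRange 0 nc 1).foldl
            (fun b j => if pvV matrix i j ≠ 0 then pvAppendAt b (i + j) (pvV matrix i j) else b)
            b) b).length = b.length ∧
       ∀ d : Int, 0 ≤ d → d < nr + nc - 1 →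
        PySem.List.pyGetD ((PySem.List.pyRange r (-1) (-1)).foldl
          (fun b i => (PySem.List.pyRange 0 nc 1).foldl
            (fun b j => if pvV matrix i j ≠ 0 then pvAppendAt b (i + j) (pvV matrix i j) else b)
            b) b) d [] =
        PySem.List.pyGetD b d [] ++
          ((PySem.List.pyRange (min d r) (max 0 (d-nc+1) - 1) (-1)).filter
            (fun i => pvV matrix i (d-i) != 0)).map (fun i => pvV matrix i (d-i))) := by
  intro n
  induction n with
  | zero =>
    intro r b hn hr hb
    rw [show PySem.List.pyRange r (-1) (-1) = [] from
      PySem.List.pyRange_neg_one_eq_nil (by omega)]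
    constructor
    · simp
    · intro d hd0 hd1
      rw [show PySem.List.pyRange (min d r) (max 0 (d-nc+1) - 1) (-1) = [] from
        PySem.List.pyRange_neg_one_eq_nil (by omega)]
      simp
  | succ n ih =>
    intro r b hn hr hb
    have hr0 : 0 ≤ r := by omega
    rw [show PySem.List.pyRange r (-1) (-1) = r :: PySem.List.pyRange (r-1) (-1) (-1) from
      PySem.List.pyRange_neg_one_cons (by omega)]
    simp only [List.foldl_cons]
    obtain ⟨ilen, iget⟩ :=
      pvInner matrix nr nc r hr0 hr (nc - 0).toNat 0 b rfl le_rfl hb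
    set b' := (PySem.List.pyRange 0 nc 1).foldl
      (fun b j => if pvV matrix r j ≠ 0 then pvAppendAt b (r + j) (pvV matrix r j) else b) b
      with hb'def
    obtain ⟨olen, oget⟩ := ih (r - 1) b' (by omega) (by omega) (by omega)
    refine ⟨olen.trans ilen, ?_⟩
    intro d hd0 hd1
    rw [oget d hd0 hd1, iget d hd0 hd1, List.append_assoc]
    congr 1
    by_cases hc : 0 ≤ d - r ∧ d - r < nc
    · have hmin : min d r = r := by omega
      have hmin' : min d (r - 1) = r - 1 := by omega
      rw [hmin, hmin',
        show PySem.List.pyRange r (max 0 (d-nc+1) - 1) (-1)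
            = r :: PySem.List.pyRange (r-1) (max 0 (d-nc+1) - 1) (-1) from
          PySem.List.pyRange_neg_one_cons (by omega)]
      by_cases hv : pvV matrix r (d - r) ≠ 0
      · rw [if_pos (show 0 ≤ d - r ∧ d - r < nc ∧ pvV matrix r (d - r) ≠ 0 from
          ⟨hc.1, hc.2, hv⟩)]
        simp [hv]
      · rw [if_neg (show ¬(0 ≤ d - r ∧ d - r < nc ∧ pvV matrix r (d - r) ≠ 0) from
          fun h => hv h.2.2)]
        simp only [ne_eq, not_not] at hv
        simp [hv]
    · rw [if_neg (show ¬(0 ≤ d - r ∧ d - r < nc ∧ pvV matrix r (d - r) ≠ 0) from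
        fun h => hc ⟨h.1, h.2.1⟩)]
      simp only [List.nil_append]
      by_cases hdr : d < r
      · have e1 : min d r = d := by omega
        have e2 : min d (r - 1) = d := by omega
        rw [e1, e2]
      · rw [show PySem.List.pyRange (min d (r-1)) (max 0 (d-nc+1) - 1) (-1) = [] from
            PySem.List.pyRange_neg_one_eq_nil (by omega),
          show PySem.List.pyRange (min d r) (max 0 (d-nc+1) - 1) (-1) = [] from
            PySem.List.pyRange_neg_one_eq_nil (by omega)]

-- B's final buckets list, as a map over the diagonal indices
theorem pvBuckets (matrix : List (List Int)) (hnr : 1 ≤ (matrix.length : Int)) :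
    ((PySem.List.pyRange ((matrix.length : Int) - 1) (-1) (-1)).foldl
      (fun b i => (PySem.List.pyRange 0 ((PySem.List.pyGetD matrix 0 []).length : Int) 1).foldl
        (fun b j => if pvV matrix i j ≠ 0 then pvAppendAt b (i + j) (pvV matrix i j) else b)
        b)
      (List.replicate ((matrix.length : Int) + ((PySem.List.pyGetD matrix 0 []).length : Int) - 1).toNat []))
    = (PySem.List.pyRange 0 ((matrix.length : Int) + ((PySem.List.pyGetD matrix 0 []).length : Int) - 1) 1).map
        (fun d => pvDiag matrix (matrix.length : Int) ((PySem.List.pyGetD matrix 0 []).length : Int) d) := by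
  set nr : Int := (matrix.length : Int) with hnrdef
  set nc : Int := ((PySem.List.pyGetD matrix 0 []).length : Int) with hncdef
  have hnc : 0 ≤ nc := by positivity
  obtain ⟨olen, oget⟩ := pvOuter matrix nr nc hnc (nr - 1 + 1).toNat (nr - 1)
    (List.replicate (nr + nc - 1).toNat []) rfl (by omega) (by simp)
  apply List.ext_getElem
  · rw [olen]
    simp [PySem.List.length_pyRange_one]
  · intro k hk1 hk2
    have hkm : k < (nr + nc - 1).toNat := by
      rw [olen] at hk1; simpa using hk1
    have h0k : (0 : Int) ≤ (k : Int) := by omega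
    have hkb : ((k : Int)) < nr + nc - 1 := by omega
    have hget := oget (k : Int) h0k hkb
    rw [PySem.List.pyGetD_natCast, PySem.List.pyGetD_natCast] at hget
    have hrepl : (List.replicate (nr + nc - 1).toNat ([] : List Int)).getD k [] = [] := by
      simp [List.getD]
    rw [hrepl, List.nil_append] at hget
    rw [List.getElem_map, PySem.List.getElem_pyRange_one,
      ← List.getD_eq_getElem _ ([] : List Int) hk1, hget]
    simp [pvDiag]

-- A's whole result as a flatMap of diagonals
theorem pvAeq (matrix : List (List Int)) (hnr : 1 ≤ (matrix.length : Int)) :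
    convert_util matrix =
      (PySem.List.pyRange 0 ((matrix.length : Int) + ((PySem.List.pyGetD matrix 0 []).length : Int) - 1) 1).flatMap
        (pvDiag matrix (matrix.length : Int) ((PySem.List.pyGetD matrix 0 []).length : Int)) := by
  have hnc : 0 ≤ ((PySem.List.pyGetD matrix 0 []).length : Int) := by positivity
  simp only [convert_util]
  refine Eq.trans (PySem.List.foldl_congr_mem _ _
    (fun acc d => acc ++ pvDiag matrix (matrix.length : Int)
      ((PySem.List.pyGetD matrix 0 []).length : Int) d) _ ?_) ?_
  · intro acc d hd
    rw [PySem.List.mem_pyRange_one] at hd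
    exact congrArg (fun t => acc ++ t)
      (convert_util_diag matrix _ _ d hnr hnc hd.1 hd.2)
  · show (PySem.List.pyRange 0 ((matrix.length : Int) + ((PySem.List.pyGetD matrix 0 []).length : Int) - 1) 1).foldl
      (fun acc d => acc ++ pvDiag matrix (matrix.length : Int) ((PySem.List.pyGetD matrix 0 []).length : Int) d) [] = _
    rw [PySem.List.foldl_append_eq_flatMap]
    simp

theorem convert_util_spec : Claim_equal_convert_util := by
  intro matrix _ hpre
  unfold Spec_convert_util
  obtain ⟨hne, -⟩ := hpre
  have hnr : 1 ≤ (matrix.length : Int) := by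
    have := List.length_pos_iff.mpr hne; omega
  rw [pvAeq matrix hnr]
  simp only [convert_util_alt]
  rw [PySem.List.foldl_append_eq_flatten, pvBuckets matrix hnr, ← List.flatMap_def]
  simp
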